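-- pv_equiv track=rewrite | github.com/MrBrantCode/unitest_baseline | mut_generate/mist_train_taco/taco_1783/solution.py | count_winning_indices
-- ===== SOURCE A (Python) =====
-- def count_winning_indices(n, nums):
--     left = [0] * n
--     right = [0] * n
--
--     # Calculate left and right arrays
--     for i in range(1, n):
--         if nums[i] > nums[i - 1]:
--             left[i] = left[i - 1] + 1
--     for i in range(n - 2, -1, -1):
--         if nums[i] > nums[i + 1]:
--             right[i] = right[i + 1] + 1
--
--     # Find the maximum values in left and right arrays
--     ml = max(left)
--     mr = max(right)
--
--     # If the maximum values are not equal, Qingshan cannot win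
--     if ml != mr:
--         return 0
--
--     # Count the occurrences of the maximum values
--     mlc = left.count(ml)
--     mrc = right.count(mr)
--
--     # If there are exactly two occurrences of the maximum values, check the condition
--     if mlc + mrc == 2:
--         for p in range(n):
--             if right[p] == mr and left[p] == ml and (not ml % 2):
--                 return 1
--
--     # Default return value if no winning condition is met
--     return 0
-- ===== SOURCE B (Python) =====
-- def count_winning_indices(n, nums):
--     # One forward pass with O(1) extra state instead of A's left/right arrays
--     # plus max()/count()/final-scan passes: track the current ascending and
--     # descending streaks, each maximum streak, its multiplicity and the peak
--     # index where the unique maximum sits.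
--     inc = dec = 0          # current ascending / descending streak lengths
--     ml = mr = 0            # max ascending streak / max descending streak
--     mlc = mrc = 0          # how many positions achieve each maximum
--     pl = pr = -1           # peak index of the unique maximum (when unique)
--     for i in range(1, n):
--         x, y = nums[i - 1], nums[i]
--         inc = inc + 1 if y > x else 0
--         dec = dec + 1 if y < x else 0
--         if inc > ml:
--             ml, mlc, pl = inc, 1, i
--         elif inc and inc == ml:
--             mlc += 1
--         if dec > mr:
--             mr, mrc, pr = dec, 1, i - dec
--         elif dec and dec == mr:
--             mrc += 1
--     if ml != mr:
--         return 0
--     if ml == 0: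
--         return 1 if n == 1 else 0
--     if mlc == 1 and mrc == 1 and pl == pr and ml % 2 == 0:
--         return 1
--     return 0
-- ===== Notes on version B (the rewrite author's own statement) =====
-- stated objective: alternative
-- what changed: A builds left/right streak arrays with two index loops, then runs max(), count() and a final scan; B makes a single forward pass keeping only O(1) state (current ascending/descending streak, each maximum, its multiplicity and peak index), never materializing the arrays.
import Mathlib
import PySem

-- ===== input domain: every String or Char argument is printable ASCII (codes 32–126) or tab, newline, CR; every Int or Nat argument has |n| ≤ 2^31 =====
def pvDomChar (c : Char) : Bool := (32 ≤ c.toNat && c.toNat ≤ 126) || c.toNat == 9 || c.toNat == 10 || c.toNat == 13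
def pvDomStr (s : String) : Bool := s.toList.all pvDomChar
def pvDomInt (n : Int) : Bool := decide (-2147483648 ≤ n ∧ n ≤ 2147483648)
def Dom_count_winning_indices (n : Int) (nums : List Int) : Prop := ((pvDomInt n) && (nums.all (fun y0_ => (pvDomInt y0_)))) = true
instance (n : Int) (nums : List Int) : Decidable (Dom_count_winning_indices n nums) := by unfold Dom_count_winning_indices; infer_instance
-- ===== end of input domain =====

-- B replaces A's two index-loop streak arrays plus the max()/count()/final-scan passes
-- by a single forward pass keeping O(1) state (alternative decomposition).

-- ===== PORT A =====
def count_winning_indices (n : Int) (nums : List Int) : Int :=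
  let left0 : List Int := List.replicate n.toNat 0
  let right0 : List Int := List.replicate n.toNat 0
  let left := (PySem.List.pyRange 1 n 1).foldl (fun l i =>
    if PySem.List.pyGetD nums i 0 > PySem.List.pyGetD nums (i - 1) 0 then
      l.set i.toNat (PySem.List.pyGetD l (i - 1) 0 + 1)
    else l) left0
  let right := (PySem.List.pyRange (n - 2) (-1) (-1)).foldl (fun r i =>
    if PySem.List.pyGetD nums i 0 > PySem.List.pyGetD nums (i + 1) 0 then
      r.set i.toNat (PySem.List.pyGetD r (i + 1) 0 + 1)
    else r) right0
  -- max(left) / max(right): Python raises ValueError on an empty list (n ≤ 0, excluded by Pre_)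
  let ml := (PySem.List.max? left (fun y => y)).getD 0
  let mr := (PySem.List.max? right (fun y => y)).getD 0
  if ml ≠ mr then 0
  else
    let mlc := PySem.List.count left ml
    let mrc := PySem.List.count right mr
    if mlc + mrc = 2 then
      if (PySem.List.pyRange 0 n 1).any (fun p =>
          PySem.List.pyGetD right p 0 == mr &&
          (PySem.List.pyGetD left p 0 == ml && PySem.Int.mod ml 2 == 0)) then 1 else 0
    else 0

-- ===== PORT B =====
-- fold state: current streaks, maxima, multiplicities, peak indices (Source B's loop locals)
structure BSt where
  inc : Int
  dec : Int
  ml : Int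
  mlc : Int
  pl : Int
  mr : Int
  mrc : Int
  pr : Int
deriving Repr, DecidableEq

-- Source B's loop body, one iteration at loop index i (reads nums[i-1], nums[i])
def pvStepB (nums : List Int) (s : BSt) (i : Int) : BSt :=
  let x := PySem.List.pyGetD nums (i - 1) 0
  let y := PySem.List.pyGetD nums i 0
  let inc := if y > x then s.inc + 1 else 0
  let dec := if y < x then s.dec + 1 else 0
  let l3 : Int × Int × Int :=
    if inc > s.ml then (inc, 1, i)
    else if inc ≠ 0 ∧ inc = s.ml then (s.ml, s.mlc + 1, s.pl)
    else (s.ml, s.mlc, s.pl)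
  let r3 : Int × Int × Int :=
    if dec > s.mr then (dec, 1, i - dec)
    else if dec ≠ 0 ∧ dec = s.mr then (s.mr, s.mrc + 1, s.pr)
    else (s.mr, s.mrc, s.pr)
  ⟨inc, dec, l3.1, l3.2.1, l3.2.2, r3.1, r3.2.1, r3.2.2⟩

def count_winning_indices_alt (n : Int) (nums : List Int) : Int :=
  let s := (PySem.List.pyRange 1 n 1).foldl (pvStepB nums)
    (⟨0, 0, 0, 0, -1, 0, 0, -1⟩ : BSt)
  if s.ml ≠ s.mr then 0
  else if s.ml = 0 then (if n = 1 then 1 else 0)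
  else if s.mlc = 1 ∧ s.mrc = 1 ∧ s.pl = s.pr ∧ PySem.Int.mod s.ml 2 = 0 then 1
  else 0

-- ===== PRECONDITION & SPEC =====
-- Pre_ excludes exactly the inputs where Python A raises: n ≤ 0 (max() of the empty
-- left array raises ValueError) and 2 ≤ n with fewer than n elements (IndexError;
-- B's indexed loop raises IndexError there as well).
def Pre_count_winning_indices (n : Int) (nums : List Int) : Prop :=
  1 ≤ n ∧ (n = 1 ∨ n ≤ (nums.length : Int))
instance (n : Int) (nums : List Int) : Decidable (Pre_count_winning_indices n nums) := by
  unfold Pre_count_winning_indices; infer_instance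

def pvWitness_count_winning_indices : Int × List Int := (5, [1, 2, 3, 2, 1])

def Spec_count_winning_indices (n : Int) (nums : List Int) (out : Int) : Prop := out = count_winning_indices_alt n nums
instance (n : Int) (nums : List Int) (out : Int) : Decidable (Spec_count_winning_indices n nums out) := by unfold Spec_count_winning_indices; infer_instance

-- ===== CLAIM (what is proved, stated in full; the proofs are below) =====
def Claim_equal_count_winning_indices : Prop := ∀ (n : Int) (nums : List Int), Dom_count_winning_indices n nums → Pre_count_winning_indices n nums → Spec_count_winning_indices n nums (count_winning_indices n nums)

-- ===== LEMMAS AND PROOFS =====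

-- value at index i (all indices A touches are in range under Pre_)
def pvG (m : List Int) (i : Nat) : Int := m.getD i 0
-- strict increase / decrease between positions i and i+1
def pvInc (m : List Int) (i : Nat) : Bool := pvG m i < pvG m (i + 1)
def pvDec (m : List Int) (i : Nat) : Bool := pvG m (i + 1) < pvG m i

-- A's left array, pointwise; the forward descending streak; A's right array (fuel N-1-i)
def pvLf (m : List Int) : Nat → Int
  | 0 => 0
  | i + 1 => if pvInc m i then pvLf m i + 1 else 0
def pvDf (m : List Int) : Nat → Int
  | 0 => 0
  | i + 1 => if pvDec m i then pvDf m i + 1 else 0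
def pvRfA (m : List Int) : Nat → Nat → Int
  | 0, _ => 0
  | f + 1, i => if pvDec m i then pvRfA m f (i + 1) + 1 else 0
def pvRf (m : List Int) (N : Nat) (i : Nat) : Int := pvRfA m (N - 1 - i) i

def pvRmax (f : Nat → Int) : Nat → Int
  | 0 => f 0
  | k + 1 => max (pvRmax f k) (f (k + 1))

def pvCnt (f : Nat → Int) (k : Nat) (v : Int) : Int :=
  (((List.range (k + 1)).countP (fun i => f i = v) : Nat) : Int)

-- streak sequences over the boolean edge list
def pvGo (d : Int) : List Bool → List Int
  | [] => []
  | e :: t => (if e then d + 1 else 0) :: pvGo (if e then d + 1 else 0) t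
def pvFwd (es : List Bool) : List Int := 0 :: pvGo 0 es
def pvBwd : List Bool → List Int
  | [] => [0]
  | e :: t => (if e then (pvBwd t).headD 0 + 1 else 0) :: pvBwd t
def pvLead : List Bool → Int
  | [] => 0
  | e :: t => if e then pvLead t + 1 else 0

lemma pvBwd_head (es : List Bool) : (pvBwd es).headD 0 = pvLead es := by
  induction es with
  | nil => rfl
  | cons e t ih =>
    cases e
    · rfl
    · show (pvBwd t).headD 0 + 1 = pvLead t + 1
      rw [ih]

lemma pvGo_shift (es : List Bool) : ∀ d : Int,
    ((pvGo (d + 1) es : List Int) : Multiset Int) + {d + 1} =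
    ((pvGo d es : List Int) : Multiset Int) + {d + 1 + pvLead es} := by
  induction es with
  | nil => intro d; simp [pvGo, pvLead]
  | cons e t ih =>
    intro d
    cases e
    · simp [pvGo, pvLead]
    · have h := ih (d + 1)
      show ((((d+1)+1) :: pvGo ((d+1)+1) t : List Int) : Multiset Int) + {d + 1} =
        (((d+1) :: pvGo (d+1) t : List Int) : Multiset Int) + {d + 1 + (pvLead t + 1)}
      rw [← Multiset.cons_coe, ← Multiset.cons_coe, ← Multiset.singleton_add, ← Multiset.singleton_add,
        show d + 1 + (pvLead t + 1) = (d + 1 + 1) + pvLead t from by ring]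
      calc ({d+1+1} : Multiset Int) + ↑(pvGo (d+1+1) t) + {d+1}
          = (↑(pvGo (d+1+1) t) + {d+1+1}) + {d+1} := by rw [add_comm ({d+1+1} : Multiset Int)]
        _ = (↑(pvGo (d+1) t) + {d+1+1+pvLead t}) + {d+1} := by rw [h]
        _ = {d+1} + ↑(pvGo (d+1) t) + {d+1+1+pvLead t} := by
              simp only [add_comm, add_left_comm, add_assoc]

lemma pvFwd_perm_bwd (es : List Bool) : (pvFwd es).Perm (pvBwd es) := by
  induction es with
  | nil => exact List.Perm.refl _
  | cons e t ih =>
    cases e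
    · exact List.Perm.cons 0 ih
    · rw [← Multiset.coe_eq_coe] at ih ⊢
      have e1 : pvFwd (true :: t) = 0 :: (0 + 1 : Int) :: pvGo (0 + 1) t := rfl
      have e2 : pvBwd (true :: t) = ((pvBwd t).headD 0 + 1) :: pvBwd t := rfl
      rw [e1, e2, pvBwd_head, ← Multiset.cons_coe, ← Multiset.cons_coe, ← Multiset.cons_coe]
      have ih' : ((pvBwd t : List Int) : Multiset Int) = ((0 :: pvGo 0 t : List Int) : Multiset Int) := by
        rw [← ih]; rfl
      rw [ih', ← Multiset.cons_coe]
      have h := pvGo_shift t 0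
      rw [← Multiset.singleton_add, ← Multiset.singleton_add, ← Multiset.singleton_add,
        ← Multiset.singleton_add]
      calc ({0} : Multiset Int) + ({0+1} + ↑(pvGo (0+1) t))
          = {0} + (↑(pvGo (0+1) t) + {0+1}) := by rw [add_comm ({0+1} : Multiset Int)]
        _ = {0} + (↑(pvGo 0 t) + {0+1+pvLead t}) := by rw [h]
        _ = {pvLead t + 1} + ({0} + ↑(pvGo 0 t)) := by
              rw [show (pvLead t + 1 : Int) = 0 + 1 + pvLead t from by ring]
              simp only [add_comm, add_left_comm, add_assoc]

-- set on a mapped range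
lemma set_map_range (f : Nat → Int) (N j : Nat) (hj : j < N) (v : Int) :
    ((List.range N).map f).set j v = (List.range N).map (fun i => if i = j then v else f i) := by
  apply List.ext_getElem
  · simp
  · intro k h1 h2
    simp only [List.getElem_set, List.getElem_map, List.getElem_range]
    by_cases hkj : j = k
    · subst hkj; simp
    · rw [if_neg hkj, if_neg (fun hh => hkj hh.symm)]

-- ===== A-side characterizations =====

lemma left_eq (nums : List Int) (N : Nat) (hN : 1 ≤ N) :
    (PySem.List.pyRange 1 (N : Int) 1).foldl (fun l i =>
      if PySem.List.pyGetD nums i 0 > PySem.List.pyGetD nums (i - 1) 0 then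
        l.set i.toNat (PySem.List.pyGetD l (i - 1) 0 + 1)
      else l) (List.replicate N 0) = (List.range N).map (pvLf nums) := by
  have main : ∀ j : Nat, 1 ≤ j → j ≤ N →
      (PySem.List.pyRange 1 (j : Int) 1).foldl (fun l i =>
        if PySem.List.pyGetD nums i 0 > PySem.List.pyGetD nums (i - 1) 0 then
          l.set i.toNat (PySem.List.pyGetD l (i - 1) 0 + 1)
        else l) (List.replicate N 0)
      = (List.range N).map (fun idx => if idx < j then pvLf nums idx else 0) := by
    intro j
    induction j with
    | zero => intro h1 _; exact absurd h1 (by omega)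
    | succ j ih =>
      intro _ hjN
      by_cases hj0 : j = 0
      · subst hj0
        rw [show (((0:Nat)+1 : Nat) : Int) = 1 from by norm_num,
          PySem.List.pyRange_one_eq_nil le_rfl, List.foldl_nil]
        apply List.ext_getElem
        · simp
        · intro k h1 h2
          simp only [List.getElem_replicate, List.getElem_map, List.getElem_range]
          by_cases hk : k < 0 + 1
          · have : k = 0 := by omega
            subst this
            rw [if_pos hk]; rfl
          · rw [if_neg hk]
      · have hj1 : 1 ≤ j := by omega
        rw [show (((j+1 : Nat)) : Int) = (j : Int) + 1 from by push_cast; ring,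
          PySem.List.pyRange_one_succ_right (by omega : (1:Int) ≤ (j:Int))]
        rw [List.foldl_append, ih hj1 (by omega)]
        simp only [List.foldl_cons, List.foldl_nil]
        have hsub : ((j:Int) - 1) = ((j-1 : Nat) : Int) := by omega
        have hgi : PySem.List.pyGetD nums ((j:Int)) 0 = pvG nums j := by
          rw [PySem.List.pyGetD_natCast]; rfl
        have hgi1 : PySem.List.pyGetD nums ((j:Int) - 1) 0 = pvG nums (j-1) := by
          rw [hsub, PySem.List.pyGetD_natCast]; rfl
        rw [hgi, hgi1]
        have hLunfold : pvLf nums j = if pvInc nums (j-1) then pvLf nums (j-1) + 1 else 0 := by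
          have hj' : j = (j-1) + 1 := by omega
          conv_lhs => rw [hj']
          simp [pvLf]
        have hIncIff : (pvInc nums (j-1) = true) ↔ pvG nums (j-1) < pvG nums j := by
          have hj' : (j-1) + 1 = j := by omega
          simp [pvInc, hj']
        by_cases hc : pvG nums (j-1) < pvG nums j
        · rw [if_pos hc]
          have hread : PySem.List.pyGetD
              ((List.range N).map fun idx => if idx < j then pvLf nums idx else 0) ((j:Int) - 1) 0
              = pvLf nums (j-1) := by
            rw [hsub, PySem.List.pyGetD_natCast]
            have hlt : j - 1 < ((List.range N).map fun idx => if idx < j then pvLf nums idx else 0).length := by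
              simp; omega
            rw [List.getD_eq_getElem _ _ hlt]
            simp only [List.getElem_map, List.getElem_range]
            rw [if_pos (by omega)]
          rw [hread]
          simp only [Int.toNat_natCast]
          rw [set_map_range _ N j (by omega)]
          apply List.map_congr_left
          intro idx hidx
          by_cases hij : idx = j
          · subst hij
            rw [if_pos rfl, if_pos (by omega), hLunfold, if_pos (hIncIff.mpr hc)]
          · rw [if_neg hij]
            by_cases hlt2 : idx < j
            · rw [if_pos hlt2, if_pos (by omega)]
            · rw [if_neg hlt2, if_neg (by omega)]
        · rw [if_neg hc]
          apply List.map_congr_left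
          intro idx hidx
          by_cases hij : idx = j
          · subst hij
            rw [if_neg (by omega), if_pos (by omega), hLunfold,
              if_neg (fun hh => hc (hIncIff.mp hh))]
          · by_cases hlt2 : idx < j
            · rw [if_pos hlt2, if_pos (by omega)]
            · rw [if_neg hlt2, if_neg (by omega)]
  rw [main N hN le_rfl]
  apply List.map_congr_left
  intro idx hidx
  rw [if_pos (List.mem_range.mp hidx)]

lemma right_eq (nums : List Int) (N : Nat) (hN : 2 ≤ N) :
    (PySem.List.pyRange ((N : Int) - 2) (-1) (-1)).foldl (fun r i =>
      if PySem.List.pyGetD nums i 0 > PySem.List.pyGetD nums (i + 1) 0 then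
        r.set i.toNat (PySem.List.pyGetD r (i + 1) 0 + 1)
      else r) (List.replicate N 0) = (List.range N).map (pvRf nums N) := by
  have hstep : ∀ j : Nat, j ≤ N - 2 →
      (if PySem.List.pyGetD nums ((j : Int)) 0 > PySem.List.pyGetD nums ((j : Int) + 1) 0 then
        ((List.range N).map (fun idx => if j + 1 ≤ idx then pvRf nums N idx else 0)).set ((j : Int)).toNat
          (PySem.List.pyGetD ((List.range N).map (fun idx => if j + 1 ≤ idx then pvRf nums N idx else 0)) ((j : Int) + 1) 0 + 1)
      else ((List.range N).map (fun idx => if j + 1 ≤ idx then pvRf nums N idx else 0)))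
      = (List.range N).map (fun idx => if j ≤ idx then pvRf nums N idx else 0) := by
    intro j hj
    have hadd : ((j:Int) + 1) = ((j+1 : Nat) : Int) := by push_cast; ring
    have hg1 : PySem.List.pyGetD nums ((j:Int)) 0 = pvG nums j := by
      rw [PySem.List.pyGetD_natCast]; rfl
    have hg2 : PySem.List.pyGetD nums ((j:Int) + 1) 0 = pvG nums (j+1) := by
      rw [hadd, PySem.List.pyGetD_natCast]; rfl
    rw [hg1, hg2]
    have hRunfold : pvRf nums N j = if pvDec nums j then pvRf nums N (j+1) + 1 else 0 := by
      have h1 : N - 1 - j = (N - 1 - (j+1)) + 1 := by omega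
      rw [pvRf, h1]
      simp [pvRfA, pvRf]
    by_cases hc : pvG nums (j+1) < pvG nums j
    · rw [if_pos hc]
      have hread : PySem.List.pyGetD
          ((List.range N).map fun idx => if j + 1 ≤ idx then pvRf nums N idx else 0) ((j:Int) + 1) 0
          = pvRf nums N (j+1) := by
        rw [hadd, PySem.List.pyGetD_natCast]
        have hlt : j + 1 < ((List.range N).map fun idx => if j + 1 ≤ idx then pvRf nums N idx else 0).length := by
          simp; omega
        rw [List.getD_eq_getElem _ _ hlt]
        simp only [List.getElem_map, List.getElem_range]
        rw [if_pos le_rfl]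
      rw [hread]
      simp only [Int.toNat_natCast]
      rw [set_map_range _ N j (by omega)]
      apply List.map_congr_left
      intro idx hidx
      by_cases hij : idx = j
      · subst hij
        rw [if_pos rfl, if_pos le_rfl, hRunfold, if_pos (by simp [pvDec]; omega)]
      · rw [if_neg hij]
        by_cases hge : j + 1 ≤ idx
        · rw [if_pos hge, if_pos (by omega)]
        · rw [if_neg hge, if_neg (by omega)]
    · rw [if_neg hc]
      apply List.map_congr_left
      intro idx hidx
      by_cases hij : idx = j
      · subst hij
        rw [if_neg (by omega), if_pos le_rfl, hRunfold, if_neg (by simp [pvDec]; omega)]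
      · by_cases hge : j + 1 ≤ idx
        · rw [if_pos (by omega), if_pos (by omega)]
        · rw [if_neg (by omega), if_neg (by omega)]
  have main : ∀ j : Nat, j ≤ N - 2 →
      (PySem.List.pyRange ((j:Int)) (-1) (-1)).foldl (fun r i =>
        if PySem.List.pyGetD nums i 0 > PySem.List.pyGetD nums (i + 1) 0 then
          r.set i.toNat (PySem.List.pyGetD r (i + 1) 0 + 1)
        else r) ((List.range N).map (fun idx => if j + 1 ≤ idx then pvRf nums N idx else 0))
      = (List.range N).map (fun idx => if 0 ≤ idx then pvRf nums N idx else 0) := by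
    intro j
    induction j with
    | zero =>
      intro hj
      rw [PySem.List.pyRange_neg_one_cons (by norm_num), PySem.List.pyRange_neg_one_eq_nil (by norm_num)]
      rw [List.foldl_cons, List.foldl_nil]
      exact hstep 0 hj
    | succ j ih =>
      intro hj
      rw [PySem.List.pyRange_neg_one_cons (by omega : (-1:Int) < ((j+1 : Nat) : Int))]
      rw [show (((j+1 : Nat)) : Int) - 1 = ((j : Nat) : Int) from by push_cast; ring]
      rw [List.foldl_cons, hstep (j+1) hj]
      exact ih (by omega)
  have hi2 : ((N:Int) - 2) = ((N-2 : Nat) : Int) := by omega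
  rw [hi2]
  have hinit : (List.replicate N (0:Int))
      = (List.range N).map (fun idx => if (N-2) + 1 ≤ idx then pvRf nums N idx else 0) := by
    apply List.ext_getElem
    · simp
    · intro k h1 h2
      simp only [List.getElem_replicate, List.getElem_map, List.getElem_range]
      by_cases hk : N - 2 + 1 ≤ k
      · have hk1 : k = N - 1 := by simp at h1; omega
        rw [if_pos hk, hk1, pvRf, show N - 1 - (N-1) = 0 from by omega]
        rfl
      · rw [if_neg hk]
  rw [hinit, main (N-2) le_rfl]
  apply List.map_congr_left
  intro idx _
  rw [if_pos (Nat.zero_le idx)]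

lemma fwd_connect (m : List Int) (N : Nat) (hN : 1 ≤ N) :
    (List.range N).map (pvDf m) = pvFwd ((List.range (N - 1)).map (pvDec m)) := by
  have main : ∀ (k s : Nat), (List.range' (s+1) k).map (pvDf m)
      = pvGo (pvDf m s) ((List.range' s k).map (pvDec m)) := by
    intro k
    induction k with
    | zero => intro s; rfl
    | succ k ih =>
      intro s
      conv_rhs => rw [List.range'_succ]
      rw [List.range'_succ]
      simp only [List.map_cons, pvGo]
      have hval : pvDf m (s+1) = if pvDec m s then pvDf m s + 1 else 0 := by simp [pvDf]
      rw [← hval]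
      exact congrArg (List.cons _) (ih (s+1))
  obtain ⟨K, hK⟩ : ∃ K, N = K + 1 := ⟨N - 1, by omega⟩
  have hK1 : N - 1 = K := by omega
  rw [show List.range N = List.range' 0 (K+1) from by rw [hK, List.range_eq_range'],
    show List.range (N-1) = List.range' 0 K from by rw [hK1, List.range_eq_range'],
    List.range'_succ]
  simp only [List.map_cons, pvFwd]
  congr 1
  exact main K 0

lemma bwd_connect (m : List Int) (N : Nat) (hN : 1 ≤ N) :
    (List.range N).map (pvRf m N) = pvBwd ((List.range (N - 1)).map (pvDec m)) := by
  have main : ∀ (k s : Nat), s + k = N - 1 → (List.range' s (k+1)).map (pvRf m N)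
      = pvBwd ((List.range' s k).map (pvDec m)) := by
    intro k
    induction k with
    | zero =>
      intro s hs
      have h0 : N - 1 - s = 0 := by omega
      show [pvRf m N s] = [0]
      rw [pvRf, h0]
      rfl
    | succ k ih =>
      intro s hs
      have ihs := ih (s+1) (by omega)
      conv_rhs => rw [List.range'_succ]
      rw [List.range'_succ]
      simp only [List.map_cons, pvBwd]
      rw [← ihs]
      have hh : ((List.range' (s+1) (k+1)).map (pvRf m N)).headD 0 = pvRf m N (s+1) := by
        rw [List.range'_succ]; rfl
      rw [hh]
      congr 1
      have h1 : N - 1 - s = (N - 1 - (s+1)) + 1 := by omega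
      rw [pvRf, h1]
      simp only [pvRfA, pvRf]
  obtain ⟨K, hK⟩ : ∃ K, N = K + 1 := ⟨N - 1, by omega⟩
  have hK1 : N - 1 = K := by omega
  rw [show List.range N = List.range' 0 (K+1) from by rw [hK, List.range_eq_range'],
    show List.range (N-1) = List.range' 0 K from by rw [hK1, List.range_eq_range']]
  exact main K 0 (by omega)

lemma rf_perm_df (m : List Int) (N : Nat) (hN : 1 ≤ N) :
    ((List.range N).map (pvRf m N)).Perm ((List.range N).map (pvDf m)) := by
  rw [fwd_connect m N hN, bwd_connect m N hN]
  exact (pvFwd_perm_bwd _).symm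

-- running max facts
lemma le_pvRmax (f : Nat → Int) (k : Nat) : ∀ i : Nat, i ≤ k → f i ≤ pvRmax f k := by
  induction k with
  | zero =>
    intro i hi
    have : i = 0 := by omega
    subst this
    exact le_rfl
  | succ k ih =>
    intro i hi
    show f i ≤ max (pvRmax f k) (f (k+1))
    by_cases hik : i ≤ k
    · exact le_trans (ih i hik) (le_max_left _ _)
    · have : i = k + 1 := by omega
      subst this
      exact le_max_right _ _

lemma pvRmax_attained (f : Nat → Int) (k : Nat) : ∃ i, i ≤ k ∧ f i = pvRmax f k := by
  induction k with
  | zero => exact ⟨0, le_rfl, rfl⟩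
  | succ k ih =>
    obtain ⟨i, hik, hi⟩ := ih
    show ∃ i, i ≤ k + 1 ∧ f i = max (pvRmax f k) (f (k+1))
    rcases le_total (f (k+1)) (pvRmax f k) with h | h
    · exact ⟨i, by omega, by rw [max_eq_left h]; exact hi⟩
    · exact ⟨k+1, le_rfl, (max_eq_right h).symm⟩

lemma perm_max?_id (xs ys : List Int) (h : xs.Perm ys) :
    PySem.List.max? xs (fun y => y) = PySem.List.max? ys (fun y => y) := by
  cases hx : PySem.List.max? xs (fun y => y) with
  | none =>
    rw [PySem.List.max?_eq_none_iff] at hx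
    subst hx
    have hy : ys = [] := h.symm.eq_nil
    rw [hy]
    exact ((PySem.List.max?_eq_none_iff _ _).mpr rfl).symm
  | some v =>
    cases hy : PySem.List.max? ys (fun y => y) with
    | none =>
      rw [PySem.List.max?_eq_none_iff] at hy
      subst hy
      have : xs = [] := h.eq_nil
      rw [this] at hx
      rw [(PySem.List.max?_eq_none_iff _ _).mpr rfl] at hx
      exact absurd hx (by simp)
    | some w =>
      have hvx := PySem.List.max?_mem hx
      have hwy := PySem.List.max?_mem hy
      have h1 := PySem.List.max?_isMax hx
      have h2 := PySem.List.max?_isMax hy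
      have hvw : v ≤ w := h2 v (h.mem_iff.mp hvx)
      have hwv : w ≤ v := h1 w (h.mem_iff.mpr hwy)
      rw [le_antisymm hvw hwv]

lemma max?_map_range (f : Nat → Int) (N : Nat) (hN : 1 ≤ N) :
    PySem.List.max? ((List.range N).map f) (fun y => y) = some (pvRmax f (N - 1)) := by
  have hne : (List.range N).map f ≠ [] := by
    intro hh
    rw [List.map_eq_nil_iff, List.range_eq_nil] at hh
    omega
  cases hx : PySem.List.max? ((List.range N).map f) (fun y => y) with
  | none => rw [PySem.List.max?_eq_none_iff] at hx; exact absurd hx hne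
  | some v =>
    have hmem := PySem.List.max?_mem hx
    have hmax := PySem.List.max?_isMax hx
    obtain ⟨i, hiN, hfi⟩ := List.mem_map.mp hmem
    have hiN' := List.mem_range.mp hiN
    obtain ⟨i0, hi0, hat⟩ := pvRmax_attained f (N-1)
    have hub : v ≤ pvRmax f (N-1) := by
      rw [← hfi]
      exact le_pvRmax f (N-1) i (by omega)
    have hlb : pvRmax f (N-1) ≤ v := by
      have hm : f i0 ∈ (List.range N).map f :=
        List.mem_map.mpr ⟨i0, List.mem_range.mpr (by omega), rfl⟩
      have := hmax _ hm
      omega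
    exact congrArg some (le_antisymm hub hlb)

lemma cnt_eq_count (f : Nat → Int) (N : Nat) (hN : 1 ≤ N) (v : Int) :
    pvCnt f (N - 1) v = ((List.count v ((List.range N).map f) : Nat) : Int) := by
  unfold pvCnt
  rw [show N - 1 + 1 = N from by omega]
  congr 1
  rw [show List.count v ((List.range N).map f) = ((List.range N).map f).countP (fun x => x == v) from rfl]
  rw [List.countP_map]
  apply List.countP_congr
  intro a _
  by_cases h : f a = v <;> simp [h]

lemma pvCnt_succ (f : Nat → Int) (k : Nat) (v : Int) :
    pvCnt f (k + 1) v = pvCnt f k v + (if f (k + 1) = v then 1 else 0) := by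
  unfold pvCnt
  rw [List.range_succ, List.countP_append]
  by_cases h : f (k+1) = v <;> simp [h]

lemma pvCnt_eq_zero (f : Nat → Int) (k : Nat) (v : Int) (h : ∀ i, i ≤ k → f i ≠ v) :
    pvCnt f k v = 0 := by
  unfold pvCnt
  have : (List.range (k+1)).countP (fun i => f i = v) = 0 := by
    rw [List.countP_eq_zero]
    intro a ha
    have := List.mem_range.mp ha
    simp only [decide_eq_true_eq]
    exact h a (by omega)
  rw [this]
  rfl

lemma pvCnt_pos (f : Nat → Int) (k : Nat) (v : Int) (i : Nat) (hi : i ≤ k) (hv : f i = v) :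
    1 ≤ pvCnt f k v := by
  unfold pvCnt
  have hm : i ∈ (List.range (k+1)).filter (fun j => decide (f j = v)) :=
    List.mem_filter.mpr ⟨List.mem_range.mpr (by omega), by simp [hv]⟩
  have hp := List.length_pos_of_mem hm
  rw [List.countP_eq_length_filter]
  omega

lemma pvCnt_unique (f : Nat → Int) (k : Nat) (v : Int) (h1 : pvCnt f k v = 1)
    (a b : Nat) (ha : a ≤ k) (hb : b ≤ k) (hfa : f a = v) (hfb : f b = v) : a = b := by
  unfold pvCnt at h1
  have h1' : (List.range (k+1)).countP (fun i => f i = v) = 1 := by exact_mod_cast h1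
  rw [List.countP_eq_length_filter] at h1'
  have hamem : a ∈ (List.range (k+1)).filter (fun i => decide (f i = v)) := by
    rw [List.mem_filter]
    exact ⟨List.mem_range.mpr (by omega), by simp [hfa]⟩
  have hbmem : b ∈ (List.range (k+1)).filter (fun i => decide (f i = v)) := by
    rw [List.mem_filter]
    exact ⟨List.mem_range.mpr (by omega), by simp [hfb]⟩
  rcases hfl : (List.range (k+1)).filter (fun i => decide (f i = v)) with _ | ⟨x, t⟩
  · rw [hfl] at hamem; simp at hamem
  · rw [hfl] at h1' hamem hbmem
    cases t with
    | nil =>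
      simp only [List.mem_singleton] at hamem hbmem
      rw [hamem, hbmem]
    | cons y t2 => simp at h1'

-- nonnegativity / bounds
lemma pvLf_nonneg (m : List Int) : ∀ i, 0 ≤ pvLf m i := by
  intro i
  induction i with
  | zero => exact le_rfl
  | succ j ih =>
    simp only [pvLf]
    split
    · omega
    · omega

lemma pvDf_nonneg (m : List Int) : ∀ i, 0 ≤ pvDf m i := by
  intro i
  induction i with
  | zero => exact le_rfl
  | succ j ih =>
    simp only [pvDf]
    split
    · omega
    · omega

lemma pvDf_le (m : List Int) : ∀ i, pvDf m i ≤ (i : Int) := by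
  intro i
  induction i with
  | zero => exact le_rfl
  | succ j ih =>
    simp only [pvDf]
    split
    · push_cast; omega
    · push_cast; omega

lemma pvDf_window (m : List Int) (i : Nat) : ∀ t : Nat, (t : Int) ≤ pvDf m i →
    pvDf m (i - t) = pvDf m i - t ∧ ∀ j, j < t → pvDec m (i - 1 - j) = true := by
  intro t
  induction t with
  | zero =>
    intro _
    constructor
    · simp
    · intro j hj; exact absurd hj (Nat.not_lt_zero j)
  | succ t ih =>
    intro h
    have hle := pvDf_le m i
    have ht : (t : Int) ≤ pvDf m i := by push_cast at h ⊢; omega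
    obtain ⟨ih1, ih2⟩ := ih ht
    have hti : t < i := by push_cast at h; omega
    have hpos : 0 < pvDf m (i - t) := by
      push_cast at h
      omega
    obtain ⟨u, hu⟩ : ∃ u, i - t = u + 1 := ⟨i - t - 1, by omega⟩
    rw [hu] at ih1 hpos
    have hdec : pvDec m u = true := by
      by_contra hnd
      rw [show pvDf m (u+1) = if pvDec m u then pvDf m u + 1 else 0 from by simp [pvDf]] at hpos
      rw [if_neg hnd] at hpos
      exact lt_irrefl _ hpos
    have hDu : pvDf m (u+1) = pvDf m u + 1 := by simp [pvDf, hdec]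
    constructor
    · rw [show i - (t+1) = u from by omega]
      push_cast
      push_cast at ih1
      omega
    · intro j hj
      by_cases hjt : j < t
      · exact ih2 j hjt
      · have : j = t := by omega
        subst this
        rw [show i - 1 - j = u from by omega]
        exact hdec

lemma pvRfA_nonneg (m : List Int) : ∀ (fuel s : Nat), 0 ≤ pvRfA m fuel s := by
  intro fuel
  induction fuel with
  | zero => intro s; exact le_rfl
  | succ f ih =>
    intro s
    show 0 ≤ (if pvDec m s then pvRfA m f (s + 1) + 1 else 0)
    split
    · have := ih (s+1); omega
    · exact le_rfl

lemma pvRfA_ge (m : List Int) : ∀ (k fuel s : Nat), k ≤ fuel →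
    (∀ j, j < k → pvDec m (s + j) = true) → (k : Int) ≤ pvRfA m fuel s := by
  intro k
  induction k with
  | zero => intro fuel s _ _; exact_mod_cast pvRfA_nonneg m fuel s
  | succ k ih =>
    intro fuel s hkf hdec
    obtain ⟨f, hf⟩ : ∃ f, fuel = f + 1 := ⟨fuel - 1, by omega⟩
    subst hf
    show ((k+1 : Nat) : Int) ≤ (if pvDec m s then pvRfA m f (s + 1) + 1 else 0)
    rw [if_pos (by simpa using hdec 0 (by omega))]
    have := ih f (s+1) (by omega) (fun j hj => by
      have h := hdec (j+1) (by omega)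
      rwa [show s + (j+1) = s + 1 + j from by omega] at h)
    push_cast
    omega

lemma position (m : List Int) (N : Nat) (hN : 1 ≤ N) (mr : Int)
    (hmr : mr = pvRmax (pvDf m) (N - 1)) (hpos : 0 < mr)
    (i0 : Nat) (hi0 : i0 ≤ N - 1) (hat : pvDf m i0 = mr) :
    pvRf m N (i0 - mr.toNat) = mr := by
  have hle : mr ≤ (i0 : Int) := hat ▸ pvDf_le m i0
  have htv : ((mr.toNat : Nat) : Int) = mr := Int.toNat_of_nonneg (by omega)
  have hwh : ((mr.toNat : Nat) : Int) ≤ pvDf m i0 := by rw [htv, hat]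
  obtain ⟨hw1, hw2⟩ := pvDf_window m i0 mr.toNat hwh
  have hlow : ((mr.toNat : Nat) : Int) ≤ pvRfA m (N - 1 - (i0 - mr.toNat)) (i0 - mr.toNat) := by
    apply pvRfA_ge
    · omega
    · intro j hj
      rw [show i0 - mr.toNat + j = i0 - 1 - (mr.toNat - 1 - j) from by omega]
      exact hw2 (mr.toNat - 1 - j) (by omega)
  have hhigh : pvRf m N (i0 - mr.toNat) ≤ mr := by
    have hmem : pvRf m N (i0 - mr.toNat) ∈ (List.range N).map (pvRf m N) :=
      List.mem_map.mpr ⟨i0 - mr.toNat, List.mem_range.mpr (by omega), rfl⟩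
    have hmem2 : pvRf m N (i0 - mr.toNat) ∈ (List.range N).map (pvDf m) :=
      (rf_perm_df m N hN).mem_iff.mp hmem
    obtain ⟨j, hj, hjv⟩ := List.mem_map.mp hmem2
    rw [← hjv, hmr]
    exact le_pvRmax _ _ _ (by have := List.mem_range.mp hj; omega)
  rw [pvRf] at hhigh ⊢
  omega

-- ===== B-side: the fold invariant =====

def pvPiL (i : Nat) (v : Int) : Int := (i : Int)
def pvPiR (i : Nat) (v : Int) : Int := (i : Int) - v

def pvSideInv (f : Nat → Int) (pf : Nat → Int → Int) (k : Nat) (ml mlc pl : Int) : Prop :=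
  ml = pvRmax f k ∧ (ml = 0 → mlc = 0) ∧
  (0 < ml → mlc = pvCnt f k ml ∧
    ∃ i0 : Nat, i0 ≤ k ∧ pl = pf i0 ml ∧ f i0 = ml ∧ ∀ j, j < i0 → f j ≠ ml)

def pvInv (m : List Int) (k : Nat) (s : BSt) : Prop :=
  s.inc = pvLf m k ∧ s.dec = pvDf m k ∧
  pvSideInv (pvLf m) pvPiL k s.ml s.mlc s.pl ∧
  pvSideInv (pvDf m) pvPiR k s.mr s.mrc s.pr

lemma pvSide_step (f : Nat → Int) (hf : ∀ i, 0 ≤ f i) (pf : Nat → Int → Int) (k : Nat)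
    (ml mlc pl : Int) (h : pvSideInv f pf k ml mlc pl) :
    pvSideInv f pf (k+1)
      (if f (k+1) > ml then f (k+1)
       else if f (k+1) ≠ 0 ∧ f (k+1) = ml then ml else ml)
      (if f (k+1) > ml then 1
       else if f (k+1) ≠ 0 ∧ f (k+1) = ml then mlc + 1 else mlc)
      (if f (k+1) > ml then pf (k+1) (f (k+1))
       else if f (k+1) ≠ 0 ∧ f (k+1) = ml then pl else pl) := by
  obtain ⟨hml, h0, hpos⟩ := h
  have hml0 : 0 ≤ ml := by
    rw [hml]
    exact le_trans (hf 0) (le_pvRmax f k 0 (by omega))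
  have hRsucc : pvRmax f (k+1) = max (pvRmax f k) (f (k+1)) := rfl
  by_cases h1 : f (k+1) > ml
  · rw [if_pos h1, if_pos h1, if_pos h1]
    have hfk : f (k+1) = pvRmax f (k+1) := by
      rw [hRsucc, ← hml, max_eq_right (le_of_lt h1)]
    refine ⟨hfk, ?_, ?_⟩
    · intro hz
      exfalso
      omega
    · intro _
      constructor
      · rw [pvCnt_succ, pvCnt_eq_zero f k (f (k+1))
          (fun i hi hv => by have := le_pvRmax f k i hi; rw [← hml] at this; omega),
          if_pos rfl]
        omega
      · refine ⟨k+1, le_rfl, rfl, rfl, ?_⟩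
        intro j hj
        have : f j ≤ ml := by
          have := le_pvRmax f k j (by omega)
          rw [← hml] at this
          exact this
        omega
  · rw [if_neg h1, if_neg h1, if_neg h1]
    by_cases h2 : f (k+1) ≠ 0 ∧ f (k+1) = ml
    · rw [if_pos h2, if_pos h2, if_pos h2]
      obtain ⟨hz, he⟩ := h2
      have hmlpos : 0 < ml := by
        have := hf (k+1)
        omega
      obtain ⟨hc, i0, hi0, hpl, hfi0, hfirst⟩ := hpos hmlpos
      have hmlS : ml = pvRmax f (k+1) := by
        rw [hRsucc, ← hml, he, max_self]
      refine ⟨hmlS, fun hzz => by omega, fun _ => ?_⟩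
      constructor
      · rw [pvCnt_succ, if_pos he, hc]
      · exact ⟨i0, by omega, hpl, hfi0, hfirst⟩
    · rw [if_neg h2, if_neg h2, if_neg h2]
      have hne : f (k+1) ≤ ml := by omega
      have hmlS : ml = pvRmax f (k+1) := by
        rw [hRsucc, ← hml, max_eq_left hne]
      refine ⟨hmlS, h0, fun hmlpos => ?_⟩
      obtain ⟨hc, i0, hi0, hpl, hfi0, hfirst⟩ := hpos hmlpos
      have hfne : f (k+1) ≠ ml := by
        intro he
        exact h2 ⟨by omega, he⟩
      constructor
      · rw [pvCnt_succ, if_neg hfne, hc]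
        ring
      · exact ⟨i0, by omega, hpl, hfi0, hfirst⟩

lemma pvInv_zero (m : List Int) : pvInv m 0 ⟨0, 0, 0, 0, -1, 0, 0, -1⟩ := by
  have hL : pvRmax (pvLf m) 0 = 0 := rfl
  have hR : pvRmax (pvDf m) 0 = 0 := rfl
  exact ⟨rfl, rfl,
    ⟨hL.symm, fun _ => rfl, fun h => absurd (hL ▸ h) (lt_irrefl 0)⟩,
    ⟨hR.symm, fun _ => rfl, fun h => absurd (hR ▸ h) (lt_irrefl 0)⟩⟩

lemma pvInv_step (m : List Int) (k : Nat) (s : BSt) (h : pvInv m k s) :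
    pvInv m (k + 1) (pvStepB m s (((k + 1 : Nat) : Int))) := by
  obtain ⟨hinc, hdec, hL, hR⟩ := h
  have hsub : (((k+1 : Nat)) : Int) - 1 = ((k : Nat) : Int) := by push_cast; ring
  have hgx : PySem.List.pyGetD m ((((k+1 : Nat)) : Int) - 1) 0 = pvG m k := by
    rw [hsub, PySem.List.pyGetD_natCast]; rfl
  have hgy : PySem.List.pyGetD m (((k+1 : Nat)) : Int) 0 = pvG m (k+1) := by
    rw [PySem.List.pyGetD_natCast]; rfl
  have einc : (if pvG m (k+1) > pvG m k then s.inc + 1 else 0) = pvLf m (k+1) := by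
    rw [hinc]
    by_cases hc : pvG m k < pvG m (k+1)
    · rw [if_pos hc]
      simp [pvLf, pvInc, hc]
    · rw [if_neg hc]
      simp [pvLf, pvInc, hc]
  have edec : (if pvG m (k+1) < pvG m k then s.dec + 1 else 0) = pvDf m (k+1) := by
    rw [hdec]
    by_cases hc : pvG m (k+1) < pvG m k
    · rw [if_pos hc]
      simp [pvDf, pvDec, hc]
    · rw [if_neg hc]
      simp [pvDf, pvDec, hc]
  unfold pvStepB
  simp only [hgx, hgy, einc, edec,
    apply_ite (Prod.fst (α := Int) (β := Int × Int)),
    apply_ite (Prod.snd (α := Int) (β := Int × Int)),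
    apply_ite (Prod.fst (α := Int) (β := Int)),
    apply_ite (Prod.snd (α := Int) (β := Int))]
  refine ⟨rfl, rfl, ?_, ?_⟩
  · exact pvSide_step (pvLf m) (pvLf_nonneg m) pvPiL k s.ml s.mlc s.pl hL
  · have hpr : ((((k+1 : Nat)) : Int)) - pvDf m (k+1) = pvPiR (k+1) (pvDf m (k+1)) := rfl
    rw [hpr]
    exact pvSide_step (pvDf m) (pvDf_nonneg m) pvPiR k s.mr s.mrc s.pr hR

lemma foldB (m : List Int) : ∀ K : Nat, 1 ≤ K →
    pvInv m (K - 1) ((PySem.List.pyRange 1 (K : Int) 1).foldl (pvStepB m)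
      ⟨0, 0, 0, 0, -1, 0, 0, -1⟩) := by
  intro K
  induction K with
  | zero => intro h; exact absurd h (by omega)
  | succ K ih =>
    intro _
    by_cases hK0 : K = 0
    · subst hK0
      rw [show (((0:Nat)+1 : Nat) : Int) = 1 from by norm_num,
        PySem.List.pyRange_one_eq_nil le_rfl, List.foldl_nil]
      exact pvInv_zero m
    · have hK1 : 1 ≤ K := by omega
      rw [show (((K+1 : Nat)) : Int) = (K : Int) + 1 from by push_cast; ring,
        PySem.List.pyRange_one_succ_right (by omega : (1:Int) ≤ (K:Int)),
        List.foldl_append, List.foldl_cons, List.foldl_nil]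
      have hKs : K = (K - 1) + 1 := by omega
      have := pvInv_step m (K - 1) _ (ih hK1)
      rw [show ((K - 1 + 1 : Nat) : Int) = ((K : Nat) : Int) from by omega] at this
      rw [show (K+1) - 1 = (K - 1) + 1 from by omega]
      exact this

-- ===== VERDICT helpers done; main proof =====
theorem count_winning_indices_spec : Claim_equal_count_winning_indices := by
  intro n nums hdom hpre
  unfold Spec_count_winning_indices
  obtain ⟨hge1, hor⟩ := hpre
  by_cases hn1 : n = 1
  · subst hn1
    have e1 : PySem.List.pyRange 1 1 1 = ([] : List Int) := PySem.List.pyRange_one_eq_nil le_rfl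
    have e2 : PySem.List.pyRange ((1:Int) - 2) (-1) (-1) = ([] : List Int) :=
      PySem.List.pyRange_neg_one_eq_nil (by norm_num)
    simp only [count_winning_indices, count_winning_indices_alt, e1, e2, List.foldl_nil]
    decide
  · have hlen : n ≤ (nums.length : Int) := by
      rcases hor with h | h
      · exact absurd h hn1
      · exact h
    have h2n : 2 ≤ n := by omega
    have hnn : ((n.toNat : Nat) : Int) = n := Int.toNat_of_nonneg (by omega)
    set N := n.toNat with hNdef
    have hN2 : 2 ≤ N := by omega
    have hN1 : 1 ≤ N := by omega
    have hNlen : N ≤ nums.length := by omega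
    rw [← hnn]
    simp only [count_winning_indices, count_winning_indices_alt, Int.toNat_natCast]
    simp only [left_eq nums N hN1, right_eq nums N hN2,
      perm_max?_id _ _ (rf_perm_df nums N hN1),
      max?_map_range (pvLf nums) N hN1, max?_map_range (pvDf nums) N hN1,
      Option.getD_some]
    obtain ⟨hsinc, hsdec, hSL, hSR⟩ := foldB nums N hN1
    obtain ⟨hsml, hsml0, hsmlpos⟩ := hSL
    obtain ⟨hsmr, hsmr0, hsmrpos⟩ := hSR
    rw [hsml] at hsmlpos
    rw [hsmr] at hsmrpos
    simp only [hsml, hsmr]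
    by_cases hme : pvRmax (pvLf nums) (N-1) = pvRmax (pvDf nums) (N-1)
    · have hA : ¬ (pvRmax (pvLf nums) (N-1) ≠ pvRmax (pvDf nums) (N-1)) := fun hc => hc hme
      rw [if_neg hA, if_neg hA]
      by_cases hml0 : pvRmax (pvLf nums) (N-1) = 0
      · have hallL : ∀ b ∈ (List.range N).map (pvLf nums), pvRmax (pvLf nums) (N-1) = b := by
          intro b hb
          obtain ⟨i, hiN, hfi⟩ := List.mem_map.mp hb
          have hi' := List.mem_range.mp hiN
          have ha1 := le_pvRmax (pvLf nums) (N-1) i (by omega)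
          have ha2 := pvLf_nonneg nums i
          omega
        have hallR : ∀ b ∈ (List.range N).map (pvRf nums N), pvRmax (pvDf nums) (N-1) = b := by
          intro b hb
          have hb2 := (rf_perm_df nums N hN1).mem_iff.mp hb
          obtain ⟨i, hiN, hfi⟩ := List.mem_map.mp hb2
          have hi' := List.mem_range.mp hiN
          have ha1 := le_pvRmax (pvDf nums) (N-1) i (by omega)
          have ha2 := pvDf_nonneg nums i
          omega
        have hcl : PySem.List.count ((List.range N).map (pvLf nums)) (pvRmax (pvLf nums) (N-1)) = N := by
          rw [PySem.List.count_eq, List.count_eq_length.mpr hallL]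
          simp
        have hcr : PySem.List.count ((List.range N).map (pvRf nums N)) (pvRmax (pvDf nums) (N-1)) = N := by
          rw [PySem.List.count_eq, List.count_eq_length.mpr hallR]
          simp
        simp only [hcl, hcr]
        rw [if_neg (by omega : ¬ (N + N = 2)), if_pos hml0,
          if_neg (by omega : ¬ ((N:Int) = 1))]
      · have hL0 : 0 ≤ pvRmax (pvLf nums) (N-1) :=
          le_trans (pvLf_nonneg nums 0) (le_pvRmax _ _ 0 (by omega))
        have hmlpos : 0 < pvRmax (pvLf nums) (N-1) := by omega
        have hmrpos : 0 < pvRmax (pvDf nums) (N-1) := by omega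
        rw [if_neg hml0]
        obtain ⟨hcL, i0L, hi0L, hplL, hfL, hfirstL⟩ := hsmlpos hmlpos
        obtain ⟨hcR, i0D, hi0D, hprR, hfD, hfirstD⟩ := hsmrpos hmrpos
        have hclq : (PySem.List.count ((List.range N).map (pvLf nums)) (pvRmax (pvLf nums) (N-1)) : Int)
            = pvCnt (pvLf nums) (N-1) (pvRmax (pvLf nums) (N-1)) := by
          rw [PySem.List.count_eq, cnt_eq_count _ _ hN1]
        have hperm2 : ((List.range N).map (pvRf nums N)).count (pvRmax (pvDf nums) (N-1))
            = ((List.range N).map (pvDf nums)).count (pvRmax (pvDf nums) (N-1)) :=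
          (rf_perm_df nums N hN1).count_eq _
        have hcrq : (PySem.List.count ((List.range N).map (pvRf nums N)) (pvRmax (pvDf nums) (N-1)) : Int)
            = pvCnt (pvDf nums) (N-1) (pvRmax (pvDf nums) (N-1)) := by
          rw [PySem.List.count_eq, hperm2, cnt_eq_count _ _ hN1]
        have hcl1 : 1 ≤ pvCnt (pvLf nums) (N-1) (pvRmax (pvLf nums) (N-1)) :=
          pvCnt_pos _ _ _ i0L hi0L hfL
        have hcr1 : 1 ≤ pvCnt (pvDf nums) (N-1) (pvRmax (pvDf nums) (N-1)) :=
          pvCnt_pos _ _ _ i0D hi0D hfD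
        by_cases hsum : PySem.List.count ((List.range N).map (pvLf nums)) (pvRmax (pvLf nums) (N-1))
            + PySem.List.count ((List.range N).map (pvRf nums N)) (pvRmax (pvDf nums) (N-1)) = 2
        · rw [if_pos hsum]
          have hc1 : pvCnt (pvLf nums) (N-1) (pvRmax (pvLf nums) (N-1)) = 1 := by omega
          have hc2 : pvCnt (pvDf nums) (N-1) (pvRmax (pvDf nums) (N-1)) = 1 := by omega
          have hcntRf : pvCnt (pvRf nums N) (N-1) (pvRmax (pvDf nums) (N-1)) = 1 := by
            rw [cnt_eq_count _ _ hN1, hperm2, ← cnt_eq_count _ _ hN1]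
            exact hc2
          have hmrle : pvRmax (pvDf nums) (N-1) ≤ (i0D : Int) := hfD ▸ pvDf_le nums i0D
          have hposn : pvRf nums N (i0D - (pvRmax (pvDf nums) (N-1)).toNat) = pvRmax (pvDf nums) (N-1) :=
            position nums N hN1 _ rfl hmrpos i0D hi0D hfD
          have hiff : ((PySem.List.pyRange 0 (N:Int) 1).any (fun p =>
                PySem.List.pyGetD ((List.range N).map (pvRf nums N)) p 0 == pvRmax (pvDf nums) (N-1) &&
                (PySem.List.pyGetD ((List.range N).map (pvLf nums)) p 0 == pvRmax (pvLf nums) (N-1) &&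
                 PySem.Int.mod (pvRmax (pvLf nums) (N-1)) 2 == 0)) = true)
              ↔ ((i0L : Int) = (i0D : Int) - pvRmax (pvDf nums) (N-1)
                  ∧ PySem.Int.mod (pvRmax (pvLf nums) (N-1)) 2 = 0) := by
            constructor
            · intro hany
              obtain ⟨p, hpmem, hp⟩ := List.any_eq_true.mp hany
              obtain ⟨hp0, hpN⟩ := PySem.List.mem_pyRange_one.mp hpmem
              have hq : ((p.toNat : Nat) : Int) = p := Int.toNat_of_nonneg hp0
              rw [Bool.and_eq_true, Bool.and_eq_true, beq_iff_eq, beq_iff_eq, beq_iff_eq] at hp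
              obtain ⟨hpr, hpl, hpar⟩ := hp
              have hgR : PySem.List.pyGetD ((List.range N).map (pvRf nums N)) p 0 = pvRf nums N p.toNat := by
                rw [← hq, PySem.List.pyGetD_natCast]
                have hlt : p.toNat < ((List.range N).map (pvRf nums N)).length := by simp; omega
                rw [List.getD_eq_getElem _ _ hlt]
                simp
                rw [max_eq_left hp0]
              have hgL : PySem.List.pyGetD ((List.range N).map (pvLf nums)) p 0 = pvLf nums p.toNat := by
                rw [← hq, PySem.List.pyGetD_natCast]
                have hlt : p.toNat < ((List.range N).map (pvLf nums)).length := by simp; omega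
                rw [List.getD_eq_getElem _ _ hlt]
                simp
                rw [max_eq_left hp0]
              rw [hgR] at hpr
              rw [hgL] at hpl
              have hqk : p.toNat ≤ N - 1 := by omega
              have hq1 : p.toNat = i0L := pvCnt_unique _ _ _ hc1 _ _ hqk hi0L hpl hfL
              have hq2 : p.toNat = i0D - (pvRmax (pvDf nums) (N-1)).toNat :=
                pvCnt_unique _ _ _ hcntRf _ _ hqk (by omega) hpr hposn
              exact ⟨by omega, hpar⟩
            · rintro ⟨hpp, hpar⟩
              apply List.any_eq_true.mpr
              refine ⟨((i0L : Nat) : Int), PySem.List.mem_pyRange_one.mpr ⟨by omega, by omega⟩, ?_⟩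
              rw [Bool.and_eq_true, Bool.and_eq_true, beq_iff_eq, beq_iff_eq, beq_iff_eq]
              have hgR : PySem.List.pyGetD ((List.range N).map (pvRf nums N)) ((i0L : Nat) : Int) 0 = pvRf nums N i0L := by
                rw [PySem.List.pyGetD_natCast]
                have hlt : i0L < ((List.range N).map (pvRf nums N)).length := by simp; omega
                rw [List.getD_eq_getElem _ _ hlt]
                simp
              have hgL : PySem.List.pyGetD ((List.range N).map (pvLf nums)) ((i0L : Nat) : Int) 0 = pvLf nums i0L := by
                rw [PySem.List.pyGetD_natCast]
                have hlt : i0L < ((List.range N).map (pvLf nums)).length := by simp; omega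
                rw [List.getD_eq_getElem _ _ hlt]
                simp
              have hiL : i0L = i0D - (pvRmax (pvDf nums) (N-1)).toNat := by omega
              refine ⟨?_, ?_, hpar⟩
              · rw [hgR, hiL]
                exact hposn
              · rw [hgL]
                exact hfL
          simp only [hcL, hcR, hplL, hprR, pvPiL, pvPiR]
          by_cases hcond : ((i0L : Int) = (i0D : Int) - pvRmax (pvDf nums) (N-1)
              ∧ PySem.Int.mod (pvRmax (pvLf nums) (N-1)) 2 = 0)
          · rw [if_pos (hiff.mpr hcond), if_pos ⟨hc1, hc2, hcond.1, hcond.2⟩]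
          · rw [if_neg (fun hh => hcond (hiff.mp hh)),
              if_neg (fun hh => hcond ⟨hh.2.2.1, hh.2.2.2⟩)]
        · rw [if_neg hsum]
          simp only [hcL, hcR]
          rw [if_neg (fun hh => hsum (by
            have e1 := hh.1
            have e2 := hh.2.1
            omega))]
    · rw [if_pos (fun hc => hme hc), if_pos (fun hc => hme hc)]
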